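-- pv_equiv track=rewrite | github.com/mitsuo0114/competitive_programming | python/atcoder/Grand018/A.py | solve
-- ===== SOURCE A (Python) =====
-- from collections import Counter
--
-- def factor(N):
--     ret = []
--     i = 2
--     while N > 1:
--         if N % i == 0:
--             ret.append(i)
--             N //= i
--         else:
--             i += 1
--     return ret
--
-- def solve(N, K, As):
--     if K > max(As):
--         return "IMPOSSIBLE"
--     iter = Counter(factor(min(As)))
--     for a in As:
--         for k, v in iter.items():
--             if a % k != 0:
--                 iter[k] = 0
--             else:
--                 count = 0
--                 kk = k
--                 while a % kk == 0:
--                     kk *= k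
--                     count += 1
--                 iter[k] = min(v, count)
--
--     if all([v == 0 for v in iter.values()]):
--         return "POSSIBLE"
--     else:
--         d = 1
--         for k, v in iter.items():
--             if v != 0:
--                 d *= k ** v
--         if K % d == 0:
--             return "POSSIBLE"
--     return "IMPOSSIBLE"
-- ===== SOURCE B (Python) =====
-- def solve(N, K, As):
--     if K > max(As):
--         return "IMPOSSIBLE"
--     d = 0
--     for a in As:
--         a = abs(a)
--         while a:
--             d, a = a, d % a
--     if d == 0 or K % d == 0:
--         return "POSSIBLE"
--     return "IMPOSSIBLE"
-- ===== Notes on version B (the rewrite author's own statement) =====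
-- stated objective: faster
-- what changed: A factorizes min(As) by trial division, tracks per-prime minimum exponents over all elements in a Counter and multiplies the surviving prime powers back together; B replaces all of that by a single Euclidean-gcd fold over the list and tests K <= max(As) and K % gcd == 0.
-- intended difference: On inputs containing a non-positive element (with K <= max(As), gcd(As) != 0 and gcd(As) not dividing K) A returns POSSIBLE because factor() treats the non-positive minimum as having no prime factors, while B returns IMPOSSIBLE, the intended divisibility-by-gcd criterion. — e.g. on solve(2, -5, [-4, -6]): A returns "POSSIBLE", B returns "IMPOSSIBLE"
import Mathlib
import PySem

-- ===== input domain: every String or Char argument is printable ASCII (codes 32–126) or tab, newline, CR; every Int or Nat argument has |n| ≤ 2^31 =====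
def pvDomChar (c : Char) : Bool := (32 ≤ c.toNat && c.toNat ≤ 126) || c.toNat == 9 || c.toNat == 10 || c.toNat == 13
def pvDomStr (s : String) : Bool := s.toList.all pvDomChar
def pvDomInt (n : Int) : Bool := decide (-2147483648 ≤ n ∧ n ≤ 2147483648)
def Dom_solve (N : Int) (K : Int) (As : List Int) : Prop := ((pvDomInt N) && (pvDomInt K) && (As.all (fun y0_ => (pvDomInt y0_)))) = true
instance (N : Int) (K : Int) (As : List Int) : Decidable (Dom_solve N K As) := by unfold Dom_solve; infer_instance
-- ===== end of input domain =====

-- B replaces A's trial-division factorization + per-prime exponent bookkeeping by a single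
-- Euclidean-gcd pass (objective: faster).

-- ===== PORT A =====
-- while N > 1: if N % i == 0: ret.append(i); N //= i else: i += 1
-- (fuel only makes the recursion total; 2*N.toNat+2 steps are proved sufficient below, so the
--  port is exact wherever the Python loop terminates)
def factorLoop : Nat → Int → Int → List Int → List Int
  | 0, _, _, ret => ret
  | fuel+1, n, i, ret =>
    if 1 < n then
      if PySem.Int.mod n i = 0 then factorLoop fuel (PySem.Int.floordiv n i) i (ret ++ [i])
      else factorLoop fuel n (i + 1) ret
    else ret

def factor (n : Int) : List Int := factorLoop (2 * n.toNat + 2) n 2 []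

-- count = 0; kk = k; while a % kk == 0: kk *= k; count += 1   (fuel a.toNat+2 proved sufficient)
def countLoop : Nat → Int → Int → Int → Int → Int
  | 0, _, _, _, count => count
  | fuel+1, a, k, kk, count =>
    if PySem.Int.mod a kk = 0 then countLoop fuel a k (kk * k) (count + 1) else count

-- the body of 'for k, v in iter.items(): ...' (k ** v with v ≥ 0 in every reachable state)
def stepA (a : Int) (it2 : PySem.Dict Int Int) (kv : Int × Int) : PySem.Dict Int Int :=
  if PySem.Int.mod a kv.1 ≠ 0 then it2.insert kv.1 0
  else it2.insert kv.1 (min kv.2 (countLoop (a.toNat + 2) a kv.1 kv.1 0))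

def solve (N : Int) (K : Int) (As : List Int) : String :=
  match PySem.List.max? As (fun y => y) with
  | none => ""   -- Python: max([]) raises ValueError; excluded by Pre_solve
  | some mx =>
    if K > mx then "IMPOSSIBLE"
    else
      match PySem.List.min? As (fun y => y) with
      | none => ""
      | some mn =>
        let it0 : PySem.Dict Int Int := PySem.Dict.counter (factor mn)
        let it := As.foldl (fun it a => it.items.foldl (stepA a) it) it0
        if it.values.all (fun v => v == 0) then "POSSIBLE"
        else
          let d := it.items.foldl (fun d kv => if kv.2 ≠ 0 then d * kv.1 ^ kv.2.toNat else d) 1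
          if PySem.Int.mod K d = 0 then "POSSIBLE" else "IMPOSSIBLE"

-- ===== PORT B =====
-- d = 0; for a in As: a = abs(a); while a: d, a = a, d % a
-- (fuel a.natAbs + 1 only makes the while-loop total; |a| strictly decreases each step,
--  so the fuel is proved sufficient below and the port is exact)
def euclid : Nat → Int → Int → Int
  | 0, d, _ => d
  | fuel + 1, d, a => if a = 0 then d else euclid fuel a (PySem.Int.mod d a)

def solve_alt (N : Int) (K : Int) (As : List Int) : String :=
  match PySem.List.max? As (fun y => y) with
  | none => ""   -- Python: max([]) raises ValueError; excluded by Pre_solve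
  | some mx =>
    if K > mx then "IMPOSSIBLE"
    else
      let d := As.foldl (fun d a => euclid (a.natAbs + 1) d (a.natAbs : Int)) 0
      if d = 0 then "POSSIBLE"
      else if PySem.Int.mod K d = 0 then "POSSIBLE" else "IMPOSSIBLE"

-- ===== PRECONDITION & SPEC =====
-- Pre_ excludes only the empty list, on which both Pythons raise ValueError (max of empty sequence).
def Pre_solve (N : Int) (K : Int) (As : List Int) : Prop := As ≠ []
instance (N : Int) (K : Int) (As : List Int) : Decidable (Pre_solve N K As) := by
  unfold Pre_solve; infer_instance

def pvWitness_solve : Int × Int × List Int := (5, 2, [12, 18])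

-- the gcd of the input list, stated through Mathlib's Multiset.gcd (a property of the input only)
def gcdInput (As : List Int) : Int := (As : Multiset Int).gcd

-- On inputs containing a non-positive element (with K ≤ max(As) and gcd(As) ∤ K, gcd ≠ 0),
-- A returns "POSSIBLE" because its factor() loop treats the non-positive minimum as having no
-- factors, while B returns "IMPOSSIBLE", the intended divisibility-by-gcd criterion.
def D_solve (N : Int) (K : Int) (As : List Int) : Prop :=
  (∃ a ∈ As, K ≤ a) ∧ (∃ a ∈ As, a ≤ 0) ∧ gcdInput As ≠ 0 ∧ ¬ (gcdInput As ∣ K)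
instance (N : Int) (K : Int) (As : List Int) : Decidable (D_solve N K As) := by
  unfold D_solve; infer_instance

def Spec_solve (N : Int) (K : Int) (As : List Int) (out : String) : Prop :=
  ¬ D_solve N K As → out = solve_alt N K As
instance (N : Int) (K : Int) (As : List Int) (out : String) : Decidable (Spec_solve N K As out) := by
  unfold Spec_solve; infer_instance

def pvDiffWitness_solve : Int × Int × List Int := (2, -5, [-4, -6])
def pvDiffWitnessOut_solve : String × String := ("POSSIBLE", "IMPOSSIBLE")

-- ===== CLAIM (what is proved, stated in full; the proofs are below) =====
def Claim_unchanged_solve : Prop := ∀ (N : Int) (K : Int) (As : List Int), Dom_solve N K As → Pre_solve N K As → Spec_solve N K As (solve N K As)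
def Claim_changed_solve : Prop := Dom_solve (pvDiffWitness_solve.1) (pvDiffWitness_solve.2.1) (pvDiffWitness_solve.2.2) ∧ Pre_solve (pvDiffWitness_solve.1) (pvDiffWitness_solve.2.1) (pvDiffWitness_solve.2.2) ∧ D_solve (pvDiffWitness_solve.1) (pvDiffWitness_solve.2.1) (pvDiffWitness_solve.2.2) ∧ solve (pvDiffWitness_solve.1) (pvDiffWitness_solve.2.1) (pvDiffWitness_solve.2.2) = pvDiffWitnessOut_solve.1 ∧ solve_alt (pvDiffWitness_solve.1) (pvDiffWitness_solve.2.1) (pvDiffWitness_solve.2.2) = pvDiffWitnessOut_solve.2 ∧ pvDiffWitnessOut_solve.1 ≠ pvDiffWitnessOut_solve.2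
def Claim_exact_solve : Prop := ∀ (N : Int) (K : Int) (As : List Int), Dom_solve N K As → Pre_solve N K As → D_solve N K As → solve N K As ≠ solve_alt N K As

-- ===== LEMMAS AND PROOFS =====

-- gcd of the list as the ports fold it (proof-side helper)
def gcdList (As : List Int) : Int := As.foldl (fun d a => ((Int.gcd d a : Nat) : Int)) 0

-- ---- B-side: the Euclid fold computes gcdList ----

theorem euclid_eq_gcd : ∀ (fuel : Nat) (a d : Int), 0 ≤ a → 0 ≤ d → a.toNat < fuel →
    euclid fuel d a = ((Int.gcd d a : Nat) : Int) := by
  intro fuel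
  induction fuel with
  | zero => intro a d _ _ hf; omega
  | succ f ihf =>
    intro a d ha hd hf
    simp only [euclid]
    by_cases h : a = 0
    · subst h
      simp [if_pos, Int.natAbs_of_nonneg hd]
    · have hpos : 0 < a := lt_of_le_of_ne ha (Ne.symm h)
      rw [if_neg h]
      have hr1 := PySem.Int.mod_nonneg d hpos
      have hr2 := PySem.Int.mod_lt d hpos
      rw [ihf (PySem.Int.mod d a) a hr1 ha (by omega)]
      congr 1
      rw [PySem.Int.mod_eq_emod_of_pos hpos]
      obtain ⟨aN, rfl⟩ := Int.eq_ofNat_of_zero_le ha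
      obtain ⟨dN, rfl⟩ := Int.eq_ofNat_of_zero_le hd
      rw [← Int.natCast_mod, Int.gcd_natCast_natCast, Int.gcd_natCast_natCast]
      rw [Nat.gcd_comm, ← Nat.gcd_rec, Nat.gcd_comm]

theorem foldl_euclid_aux (As : List Int) : ∀ (d : Int), 0 ≤ d →
    As.foldl (fun d a => euclid (a.natAbs + 1) d (a.natAbs : Int)) d
      = As.foldl (fun d a => ((Int.gcd d a : Nat) : Int)) d := by
  induction As with
  | nil => intro d _; rfl
  | cons a t iht =>
    intro d hd
    simp only [List.foldl_cons]
    rw [euclid_eq_gcd _ _ _ (Int.natCast_nonneg _) hd (by simp)]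
    have hg : Int.gcd d ((a.natAbs : Nat) : Int) = Int.gcd d a := by
      simp [Int.gcd_def, Int.natAbs_abs]
    rw [hg, iht _ (Int.natCast_nonneg _)]

theorem foldl_euclid_eq_gcdList (As : List Int) :
    As.foldl (fun d a => euclid (a.natAbs + 1) d (a.natAbs : Int)) 0 = gcdList As :=
  foldl_euclid_aux As 0 le_rfl

theorem gcdList_foldl_nonneg (As : List Int) : ∀ (d : Int), 0 ≤ d →
    0 ≤ As.foldl (fun d a => ((Int.gcd d a : Nat) : Int)) d := by
  induction As with
  | nil => intro d hd; exact hd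
  | cons a t iht =>
    intro d _
    simp only [List.foldl_cons]
    exact iht _ (Int.natCast_nonneg _)

theorem gcdList_nonneg (As : List Int) : 0 ≤ gcdList As :=
  gcdList_foldl_nonneg As 0 le_rfl

theorem gcdList_foldl_dvd_init (As : List Int) : ∀ (d : Int),
    As.foldl (fun d a => ((Int.gcd d a : Nat) : Int)) d ∣ d := by
  induction As with
  | nil => intro d; exact dvd_refl d
  | cons a t iht =>
    intro d
    simp only [List.foldl_cons]
    exact dvd_trans (iht _) (Int.gcd_dvd_left d a)

theorem gcdList_foldl_dvd_mem (As : List Int) {x : Int} (hx : x ∈ As) : ∀ (d : Int),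
    As.foldl (fun d a => ((Int.gcd d a : Nat) : Int)) d ∣ x := by
  induction As with
  | nil => cases hx
  | cons a t iht =>
    intro d
    simp only [List.foldl_cons]
    rcases List.mem_cons.mp hx with h | h
    · subst h
      exact dvd_trans (gcdList_foldl_dvd_init t _) (Int.gcd_dvd_right d x)
    · exact iht h _

theorem gcdList_dvd_mem (As : List Int) {x : Int} (hx : x ∈ As) : gcdList As ∣ x :=
  gcdList_foldl_dvd_mem As hx 0

theorem dvd_gcdList_aux (As : List Int) {c : Int} (h : ∀ x ∈ As, c ∣ x) : ∀ (d : Int), c ∣ d →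
    c ∣ As.foldl (fun d a => ((Int.gcd d a : Nat) : Int)) d := by
  induction As with
  | nil => intro d hd; exact hd
  | cons a t iht =>
    intro d hd
    simp only [List.foldl_cons]
    apply iht (fun x hx => h x (List.mem_cons_of_mem _ hx))
    have hnat : c.natAbs ∣ Int.gcd d a :=
      Nat.dvd_gcd (Int.natAbs_dvd_natAbs.mpr hd)
        (Int.natAbs_dvd_natAbs.mpr (h a List.mem_cons_self))
    exact Int.natAbs_dvd.mp (Int.natCast_dvd_natCast.mpr hnat)

theorem dvd_gcdList (As : List Int) {c : Int} (h : ∀ x ∈ As, c ∣ x) : c ∣ gcdList As :=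
  dvd_gcdList_aux As h 0 (dvd_zero c)

theorem gcdInput_nonneg (As : List Int) : 0 ≤ gcdInput As := by
  cases As with
  | nil =>
    show (0 : Int) ≤ Multiset.gcd _
    rw [Multiset.coe_nil, Multiset.gcd_zero]
  | cons a t =>
    show (0 : Int) ≤ Multiset.gcd _
    rw [← Multiset.cons_coe, Multiset.gcd_cons, ← Int.coe_gcd]
    exact Int.natCast_nonneg _

theorem gcdInput_eq_gcdList (As : List Int) : gcdInput As = gcdList As := by
  apply Int.dvd_antisymm (gcdInput_nonneg As) (gcdList_nonneg As)
  · apply dvd_gcdList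
    intro x hx
    exact Multiset.gcd_dvd (Multiset.mem_coe.mpr hx)
  · apply Multiset.dvd_gcd.mpr
    intro b hb
    exact gcdList_dvd_mem As (Multiset.mem_coe.mp hb)

-- ---- A-side: factor computes the prime factor list ----

theorem pfl_cons (n : Nat) (h2 : 2 ≤ n) :
    n.primeFactorsList = n.minFac :: (n / n.minFac).primeFactorsList := by
  obtain ⟨k, rfl⟩ : ∃ k, n = k + 2 := ⟨n - 2, by omega⟩
  rw [Nat.primeFactorsList]

theorem factorLoop_eq (fuel : Nat) : ∀ (n i : Nat) (ret : List Int), 2 ≤ i →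
    (∀ d, 2 ≤ d → d < i → ¬ (d ∣ n)) → 2 * n ≤ fuel + i →
    factorLoop fuel (n : Int) (i : Int) ret
      = ret ++ (n.primeFactorsList.map (fun (p : Nat) => (p : Int))) := by
  induction fuel using Nat.strong_induction_on with
  | _ fuel ih =>
    intro n i ret hi hinv hfuel
    by_cases hn : n ≤ 1
    · have hpf : n.primeFactorsList = [] := by
        interval_cases n
        · exact Nat.primeFactorsList_zero
        · exact Nat.primeFactorsList_one
      have hlt : ¬ ((1 : Int) < (n : Int)) := by exact_mod_cast (by omega : ¬ (1 < n))
      cases fuel with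
      | zero => simp [factorLoop, hpf]
      | succ f => simp [factorLoop, hlt, hpf]
    · push_neg at hn
      have hin : i ≤ n := by
        by_contra hgt
        exact hinv n hn (by omega) (dvd_refl n)
      obtain ⟨f, rfl⟩ : ∃ f, fuel = f + 1 := ⟨fuel - 1, by omega⟩
      have hlt : (1 : Int) < (n : Int) := by exact_mod_cast hn
      simp only [factorLoop, if_pos hlt]
      rw [PySem.Int.mod_natCast]
      by_cases hdv : i ∣ n
      · have hmodN : n % i = 0 := Nat.mod_eq_zero_of_dvd hdv
        rw [if_pos (by exact_mod_cast congrArg (fun (x : Nat) => (x : Int)) hmodN)]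
        rw [PySem.Int.floordiv_natCast]
        have hmf2 : 2 ≤ n.minFac := (Nat.minFac_prime (by omega : n ≠ 1)).two_le
        have himin : i = n.minFac := by
          have h1 : n.minFac ≤ i := Nat.minFac_le_of_dvd hi hdv
          have h2 : i ≤ n.minFac := by
            by_contra hgt
            push_neg at hgt
            exact hinv n.minFac hmf2 hgt (Nat.minFac_dvd n)
          omega
        have hinv' : ∀ d, 2 ≤ d → d < i → ¬ (d ∣ n / i) :=
          fun d h2d hdi hdd => hinv d h2d hdi (dvd_trans hdd (Nat.div_dvd_of_dvd hdv))
        have hq2 : n / i ≤ n / 2 := Nat.div_le_div_left hi (by omega)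
        have hfuel' : 2 * (n / i) ≤ f + i := by omega
        rw [ih f (by omega) (n / i) i (ret ++ [(i : Int)]) hi hinv' hfuel']
        rw [pfl_cons n hn, ← himin]
        simp
      · have hmodnz : ¬ (((n % i : Nat) : Int) = 0) := by
          have hne : n % i ≠ 0 := fun hz => hdv (Nat.dvd_of_mod_eq_zero hz)
          exact_mod_cast hne
        rw [if_neg hmodnz]
        have hcast : ((i : Nat) : Int) + 1 = ((i + 1 : Nat) : Int) := by push_cast; ring
        rw [hcast]
        exact ih f (by omega) n (i + 1) ret (by omega)
          (fun d h2d hdlt => by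
            rcases Nat.lt_or_ge d i with h | h
            · exact hinv d h2d h
            · have : d = i := by omega
              subst this
              exact hdv)
          (by omega)

theorem factor_eq {mn : Int} (h : 2 ≤ mn) :
    factor mn = mn.toNat.primeFactorsList.map (fun (p : Nat) => (p : Int)) := by
  obtain ⟨m, rfl⟩ : ∃ m : Nat, mn = (m : Int) := ⟨mn.toNat, by omega⟩
  unfold factor
  rw [Int.toNat_natCast]
  rw [show ((2 : Int)) = ((2 : Nat) : Int) by norm_num]
  exact factorLoop_eq (2 * m + 2) m 2 [] le_rfl (by omega) (by omega)

theorem factor_of_le_one {mn : Int} (h : mn ≤ 1) : factor mn = [] := by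
  have hlt : ¬ ((1 : Int) < mn) := by omega
  show factorLoop (2 * mn.toNat + 2) mn 2 [] = []
  generalize (2 * mn.toNat + 2) = fuel
  cases fuel with
  | zero => rfl
  | succ f => simp [factorLoop, hlt]

-- ---- A-side: countLoop computes the p-adic valuation ----

theorem countLoop_eq (a k : Int) (c : Nat) (ha : 1 ≤ a)
    (hdvd : k ^ c ∣ a) (hnd : ¬ k ^ (c + 1) ∣ a) :
    ∀ (fuel : Nat) (j : Nat), j ≤ c → c - j < fuel →
      countLoop fuel a k (k ^ (j + 1)) (j : Int) = (c : Int) := by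
  intro fuel
  induction fuel with
  | zero => intro j hj hf; omega
  | succ f ihf =>
    intro j hj hf
    simp only [countLoop]
    by_cases hdvj : k ^ (j + 1) ∣ a
    · have hjc : j < c := by
        rcases Nat.lt_or_ge j c with h | h
        · exact h
        · exfalso
          have : j = c := le_antisymm hj h
          subst this
          exact hnd hdvj
      rw [if_pos ((PySem.Int.mod_eq_zero_iff_dvd a (k ^ (j + 1))).mpr hdvj)]
      have hkk : k ^ (j + 1) * k = k ^ (j + 1 + 1) := (pow_succ k (j + 1)).symm
      have hcnt : ((j : Int) + 1) = ((j + 1 : Nat) : Int) := by push_cast; ring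
      rw [hkk, hcnt]
      exact ihf (j + 1) hjc (by omega)
    · have hcj : c = j := by
        by_contra hne
        have hjc : j + 1 ≤ c := by omega
        exact hdvj (dvd_trans (pow_dvd_pow k hjc) hdvd)
      rw [if_neg (fun hmod => hdvj ((PySem.Int.mod_eq_zero_iff_dvd a (k ^ (j + 1))).mp hmod))]
      rw [hcj]

theorem countLoop_factorization (a k : Int) (ha : 1 ≤ a) (hk : 2 ≤ k) (hp : (k.toNat).Prime) :
    countLoop (a.toNat + 2) a k k 0 = (a.toNat.factorization k.toNat : Int) := by
  have haa : a = ((a.toNat : Nat) : Int) := by omega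
  have hkk : k = ((k.toNat : Nat) : Int) := by omega
  have hanz : a.toNat ≠ 0 := by omega
  set c := a.toNat.factorization k.toNat with hc
  have hdvdN : k.toNat ^ c ∣ a.toNat := Nat.ordProj_dvd _ _
  have hndN : ¬ k.toNat ^ (c + 1) ∣ a.toNat := Nat.pow_succ_factorization_not_dvd hanz hp
  have hdvd : k ^ c ∣ a := by
    rw [haa, hkk]
    exact_mod_cast Int.natCast_dvd_natCast.mpr hdvdN
  have hnd : ¬ k ^ (c + 1) ∣ a := by
    rw [haa, hkk]
    intro hcon
    exact hndN (by exact_mod_cast hcon)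
  have hcle : c ≤ a.toNat := by
    have h1 : k.toNat ^ c ≤ a.toNat := Nat.le_of_dvd (by omega) hdvdN
    have h2 : 2 ^ c ≤ k.toNat ^ c := Nat.pow_le_pow_left (by omega) c
    have h3 : c < 2 ^ c := Nat.lt_two_pow_self
    omega
  simpa using countLoop_eq a k c ha hdvd hnd (a.toNat + 2) 0 (by omega) (by omega)

-- ---- dict bookkeeping ----

def newv (a : Int) (kv : Int × Int) : Int :=
  if PySem.Int.mod a kv.1 ≠ 0 then 0 else min kv.2 (countLoop (a.toNat + 2) a kv.1 kv.1 0)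

theorem stepA_eq (a : Int) : stepA a = fun it2 kv => it2.insert kv.1 (newv a kv) := by
  funext it2 kv
  simp only [stepA, newv]
  split <;> rfl

theorem getD_foldl_insert_of_not_mem (l : List (Int × Int)) (g : Int × Int → Int) (k : Int)
    (hk : k ∉ l.map Prod.fst) : ∀ (d : PySem.Dict Int Int),
    (l.foldl (fun d2 kv => d2.insert kv.1 (g kv)) d).getD k 0 = d.getD k 0 := by
  induction l with
  | nil => intro d; rfl
  | cons p t iht =>
    intro d
    simp only [List.map_cons, List.mem_cons] at hk
    push_neg at hk
    simp only [List.foldl_cons]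
    rw [iht (by exact hk.2) _]
    exact PySem.Dict.getD_insert_of_ne d _ _ hk.1

theorem getD_foldl_insert_of_mem (l : List (Int × Int)) (g : Int × Int → Int) (k v : Int)
    (hnd : (l.map Prod.fst).Nodup) (hmem : (k, v) ∈ l) : ∀ (d : PySem.Dict Int Int),
    (l.foldl (fun d2 kv => d2.insert kv.1 (g kv)) d).getD k 0 = g (k, v) := by
  induction l with
  | nil => cases hmem
  | cons p t iht =>
    intro d
    simp only [List.map_cons, List.nodup_cons] at hnd
    simp only [List.foldl_cons]
    rcases List.mem_cons.mp hmem with h | h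
    · subst h
      rw [getD_foldl_insert_of_not_mem t g k (by exact hnd.1) _]
      exact PySem.Dict.getD_insert_self d _ _ _
    · exact iht hnd.2 h _

theorem set_update_self (s : PySem.Set Int) : PySem.Set.update s s = s := by
  rw [PySem.Set.update_eq_append_filter]
  have hnil : (PySem.Set.ofList s).filter (fun y => !PySem.Set.contains s y) = [] := by
    apply List.filter_eq_nil_iff.mpr
    intro y hy
    have hmem : y ∈ s := (PySem.Set.mem_ofList s y).mp hy
    simp [hmem]
  rw [hnil, List.append_nil]

theorem inner_keys (a : Int) (it : PySem.Dict Int Int) :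
    (it.items.foldl (stepA a) it).keys = it.keys := by
  rw [stepA_eq]
  rw [PySem.Dict.keys_foldl_insert_key it.items Prod.fst (fun _ kv => newv a kv) it]
  have hk : it.items.map Prod.fst = it.keys := rfl
  rw [hk, set_update_self]

theorem inner_getD (a : Int) (it : PySem.Dict Int Int) (hnd : it.keys.Nodup) {k : Int}
    (hk : k ∈ it.keys) :
    (it.items.foldl (stepA a) it).getD k 0 = newv a (k, it.getD k 0) := by
  rw [stepA_eq]
  rw [PySem.Dict.items_eq_map_keys it hnd 0]
  apply getD_foldl_insert_of_mem
  · simp only [List.map_map]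
    have : (Prod.fst ∘ fun k => (k, it.getD k 0)) = id := by
      funext x; rfl
    rw [this, List.map_id]
    exact hnd
  · exact List.mem_map_of_mem hk

theorem outer_fold (l : List Int) : ∀ (it : PySem.Dict Int Int), it.keys.Nodup →
    ((l.foldl (fun it a => it.items.foldl (stepA a) it) it).keys = it.keys ∧
     ∀ k ∈ it.keys, (l.foldl (fun it a => it.items.foldl (stepA a) it) it).getD k 0 =
       l.foldl (fun v a => newv a (k, v)) (it.getD k 0)) := by
  induction l with
  | nil => intro it hnd; exact ⟨rfl, fun k _ => rfl⟩
  | cons a t iht =>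
    intro it hnd
    simp only [List.foldl_cons]
    have hk1 : (it.items.foldl (stepA a) it).keys = it.keys := inner_keys a it
    have hnd1 : (it.items.foldl (stepA a) it).keys.Nodup := by rw [hk1]; exact hnd
    obtain ⟨ihk, ihv⟩ := iht _ hnd1
    constructor
    · rw [ihk, hk1]
    · intro k hk
      rw [ihv k (by rw [hk1]; exact hk)]
      rw [inner_getD a it hnd hk]

-- ---- value characterization ----

def eI (p : Nat) (a : Int) : Nat := a.toNat.factorization p

def Vv (mn : Int) (As : List Int) (p : Nat) : Nat := (As.map (eI p)).foldl min (eI p mn)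

theorem newv_cast (p : Nat) (hp : p.Prime) (a : Int) (ha : 1 ≤ a) (v : Nat) :
    newv a ((p : Int), (v : Int)) = ((min v (eI p a) : Nat) : Int) := by
  have haa : a = ((a.toNat : Nat) : Int) := by omega
  have hpd : ((p : Int) ∣ a) ↔ p ∣ a.toNat := by
    rw [haa]
    exact Int.natCast_dvd_natCast
  simp only [newv]
  by_cases hdv : (p : Int) ∣ a
  · rw [if_neg (by simp [PySem.Int.mod_eq_zero_iff_dvd, hdv])]
    have h2 : (2 : Int) ≤ (p : Int) := by exact_mod_cast hp.two_le
    have hpn : ((p : Int)).toNat = p := by omega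
    rw [countLoop_factorization a (p : Int) ha h2 (by rw [hpn]; exact hp)]
    rw [hpn]
    have heI : a.toNat.factorization p = eI p a := rfl
    rw [heI]
    exact (Nat.cast_min _ _).symm
  · rw [if_pos (by simp [PySem.Int.mod_eq_zero_iff_dvd, hdv])]
    have hz : eI p a = 0 := Nat.factorization_eq_zero_of_not_dvd (fun h => hdv (hpd.mpr h))
    simp [hz]

theorem foldl_newv_eq (As : List Int) (p : Nat) (hp : p.Prime) (h2 : ∀ a ∈ As, 1 ≤ a) :
    ∀ (v0 : Nat),
    As.foldl (fun v a => newv a ((p : Int), v)) ((v0 : Nat) : Int) =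
      (((As.map (eI p)).foldl min v0 : Nat) : Int) := by
  induction As with
  | nil => intro v0; rfl
  | cons a t iht =>
    intro v0
    simp only [List.foldl_cons, List.map_cons]
    rw [newv_cast p hp a (h2 a List.mem_cons_self)]
    exact iht (fun x hx => h2 x (List.mem_cons_of_mem _ hx)) _

theorem foldl_min_le_init (l : List Nat) : ∀ (v0 : Nat), l.foldl min v0 ≤ v0 := by
  induction l with
  | nil => intro v0; exact le_rfl
  | cons a t iht =>
    intro v0
    simp only [List.foldl_cons]
    exact le_trans (iht _) (min_le_left _ _)

theorem foldl_min_le_mem (l : List Nat) {x : Nat} (hx : x ∈ l) : ∀ (v0 : Nat),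
    l.foldl min v0 ≤ x := by
  induction l with
  | nil => cases hx
  | cons a t iht =>
    intro v0
    simp only [List.foldl_cons]
    rcases List.mem_cons.mp hx with h | h
    · subst h
      exact le_trans (foldl_min_le_init t _) (min_le_right _ _)
    · exact iht h _

theorem le_foldl_min (l : List Nat) {c : Nat} (h : ∀ x ∈ l, c ≤ x) : ∀ (v0 : Nat), c ≤ v0 →
    c ≤ l.foldl min v0 := by
  induction l with
  | nil => intro v0 h0; exact h0
  | cons a t iht =>
    intro v0 h0
    simp only [List.foldl_cons]
    exact iht (fun x hx => h x (List.mem_cons_of_mem _ hx)) _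
      (le_min h0 (h a List.mem_cons_self))

-- ---- sets / maps ----

theorem ofList_map_natCast (l : List Nat) :
    PySem.Set.ofList (l.map (fun (p : Nat) => (p : Int)))
      = (PySem.Set.ofList l).map (fun (p : Nat) => (p : Int)) := by
  induction l using List.reverseRecOn with
  | nil => rfl
  | append_singleton t x iht =>
    rw [List.map_append, List.map_singleton]
    rw [PySem.Set.ofList_append_singleton, PySem.Set.ofList_append_singleton]
    rw [iht]
    rw [PySem.Set.add_eq_ite, PySem.Set.add_eq_ite]
    by_cases hx : x ∈ PySem.Set.ofList t
    · rw [if_pos hx, if_pos (List.mem_map_of_mem hx)]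
    · rw [if_neg hx, if_neg (by
        intro hcon
        obtain ⟨y, hy, hyx⟩ := List.mem_map.mp hcon
        have hxy : y = x := by exact_mod_cast hyx
        exact hx (hxy ▸ hy))]
      rw [List.map_append, List.map_singleton]

-- ---- product ----

theorem foldl_prod_cast (pairs : List (Nat × Nat)) : ∀ (acc : Int),
    (pairs.map (fun pv => ((pv.1 : Int), (pv.2 : Int)))).foldl
        (fun d kv => if kv.2 ≠ 0 then d * kv.1 ^ kv.2.toNat else d) acc
      = acc * ((pairs.map (fun pv => (pv.1 : Int) ^ pv.2)).prod) := by
  induction pairs with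
  | nil => intro acc; simp
  | cons pv t iht =>
    intro acc
    simp only [List.map_cons, List.foldl_cons, List.prod_cons]
    by_cases hv : pv.2 = 0
    · rw [if_neg (by simp [hv])]
      rw [iht acc, hv, pow_zero, one_mul]
    · rw [if_pos (by simp [hv])]
      rw [iht, Int.toNat_natCast]
      ring

theorem cast_prod_pow (L : List Nat) (f : Nat → Nat) :
    ((L.map (fun (p : Nat) => (p : Int) ^ f p)).prod)
      = (((L.map (fun p => p ^ f p)).prod : Nat) : Int) := by
  induction L with
  | nil => simp
  | cons p t iht =>
    simp only [List.map_cons, List.prod_cons, iht]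
    push_cast
    ring

-- ---- the number-theoretic core ----

theorem prod_primes_ne_zero (L : List Nat) (hpr : ∀ p ∈ L, p.Prime) (f : Nat → Nat) :
    (L.map (fun p => p ^ f p)).prod ≠ 0 := by
  induction L with
  | nil => simp
  | cons p t iht =>
    simp only [List.map_cons, List.prod_cons]
    exact mul_ne_zero (pow_ne_zero _ (hpr p List.mem_cons_self).ne_zero)
      (iht (fun q hq => hpr q (List.mem_cons_of_mem _ hq)))

theorem fact_prod_primes (L : List Nat) (hnd : L.Nodup) (hpr : ∀ p ∈ L, p.Prime) (f : Nat → Nat) :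
    ∀ q, ((L.map (fun p => p ^ f p)).prod).factorization q = if q ∈ L then f q else 0 := by
  induction L with
  | nil => intro q; simp
  | cons p t iht =>
    intro q
    simp only [List.map_cons, List.prod_cons]
    have hp : p.Prime := hpr p List.mem_cons_self
    have hprt : ∀ x ∈ t, x.Prime := fun x hx => hpr x (List.mem_cons_of_mem _ hx)
    have hndt : t.Nodup := (List.nodup_cons.mp hnd).2
    have hpt : p ∉ t := (List.nodup_cons.mp hnd).1
    rw [Nat.factorization_mul (pow_ne_zero _ hp.ne_zero) (prod_primes_ne_zero t hprt f)]
    rw [Finsupp.add_apply]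
    rw [hp.factorization_pow]
    rw [iht hndt hprt q]
    rw [Finsupp.single_apply]
    by_cases hq : q = p
    · subst hq
      rw [if_pos rfl, if_neg hpt, if_pos List.mem_cons_self]
      omega
    · rw [if_neg (fun h => hq h.symm)]
      by_cases hqt : q ∈ t
      · rw [if_pos hqt, if_pos (List.mem_cons_of_mem _ hqt)]
        omega
      · rw [if_neg hqt, if_neg (by simp [List.mem_cons, hq, hqt])]

theorem core_eq (As : List Int) (mn : Int) (hmem : mn ∈ As) (hmn : 2 ≤ mn)
    (hall : ∀ a ∈ As, mn ≤ a) :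
    ((((PySem.Set.ofList mn.toNat.primeFactorsList).map (fun p => p ^ Vv mn As p)).prod : Nat) : Int)
      = gcdList As := by
  set m := mn.toNat with hm
  have hm2 : 2 ≤ m := by omega
  have hmnz : m ≠ 0 := by omega
  have hmncast : mn = ((m : Nat) : Int) := by omega
  set L : List Nat := PySem.Set.ofList m.primeFactorsList with hL
  have hLnd : L.Nodup := PySem.Set.nodup_ofList _
  have hLpr : ∀ p ∈ L, p.Prime := by
    intro p hp
    exact Nat.prime_of_mem_primeFactorsList ((PySem.Set.mem_ofList _ _).mp hp)
  have hLmem : ∀ p, p.Prime → p ∣ m → p ∈ L := by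
    intro p hp hdv
    exact (PySem.Set.mem_ofList _ _).mpr ((Nat.mem_primeFactorsList hmnz).mpr ⟨hp, hdv⟩)
  set D : Nat := ((L.map (fun p => p ^ Vv mn As p)).prod) with hD
  have hDnz : D ≠ 0 := prod_primes_ne_zero L hLpr _
  have hDfact : ∀ q, D.factorization q = if q ∈ L then Vv mn As q else 0 :=
    fact_prod_primes L hLnd hLpr _
  have hA2 : ∀ a ∈ As, 2 ≤ a := fun a ha => le_trans hmn (hall a ha)
  have hAcast : ∀ a ∈ As, a = ((a.toNat : Nat) : Int) := by
    intro a ha; have := hA2 a ha; omega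
  have hAnz : ∀ a ∈ As, a.toNat ≠ 0 := by
    intro a ha; have := hA2 a ha; omega
  have hVle : ∀ q, ∀ a ∈ As, Vv mn As q ≤ a.toNat.factorization q := by
    intro q a ha
    have h1 : (As.map (eI q)).foldl min (eI q mn) ≤ eI q a :=
      foldl_min_le_mem _ (List.mem_map_of_mem ha) _
    exact h1
  have hVge : ∀ q (c : Nat), (∀ a ∈ As, c ≤ a.toNat.factorization q) → c ≤ Vv mn As q := by
    intro q c hc
    have h1 : c ≤ (As.map (eI q)).foldl min (eI q mn) := by
      apply le_foldl_min
      · intro x hx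
        obtain ⟨a, ha, rfl⟩ := List.mem_map.mp hx
        exact hc a ha
      · exact hc mn hmem
    exact h1
  have hDdvd : ∀ a ∈ As, ((D : Nat) : Int) ∣ a := by
    intro a ha
    rw [hAcast a ha]
    apply Int.natCast_dvd_natCast.mpr
    rw [← Nat.factorization_le_iff_dvd hDnz (hAnz a ha)]
    rw [Finsupp.le_def]
    intro q
    rw [hDfact q]
    by_cases hq : q ∈ L
    · rw [if_pos hq]; exact hVle q a ha
    · rw [if_neg hq]; exact Nat.zero_le _
  have hDg : ((D : Nat) : Int) ∣ gcdList As := dvd_gcdList As hDdvd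
  have hgnn : 0 ≤ gcdList As := gcdList_nonneg As
  have hgcast : gcdList As = (((gcdList As).toNat : Nat) : Int) := by omega
  set gN : Nat := (gcdList As).toNat with hgN
  have hgdvdm : gN ∣ m := by
    have h1 : gcdList As ∣ mn := gcdList_dvd_mem As hmem
    rw [hgcast, hmncast] at h1
    exact_mod_cast h1
  have hgnz : gN ≠ 0 := by
    intro h0
    rw [h0] at hgdvdm
    omega
  have hgdvda : ∀ a ∈ As, gN ∣ a.toNat := by
    intro a ha
    have h1 : gcdList As ∣ a := gcdList_dvd_mem As ha
    rw [hgcast, hAcast a ha] at h1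
    exact_mod_cast h1
  have hgD : gN ∣ D := by
    rw [← Nat.factorization_le_iff_dvd hgnz hDnz]
    rw [Finsupp.le_def]
    intro q
    rw [hDfact q]
    by_cases hq : q ∈ L
    · rw [if_pos hq]
      apply hVge
      intro a ha
      exact (Finsupp.le_def.mp
        ((Nat.factorization_le_iff_dvd hgnz (hAnz a ha)).mpr (hgdvda a ha))) q
    · rw [if_neg hq]
      by_cases hqp : q.Prime
      · have hqm : ¬ q ∣ m := fun hdvq => hq (hLmem q hqp hdvq)
        have hqg : ¬ q ∣ gN := fun hdvq => hqm (dvd_trans hdvq hgdvdm)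
        simp [Nat.factorization_eq_zero_of_not_dvd hqg]
      · simp [Nat.factorization_eq_zero_of_not_prime _ hqp]
  have hDgN : D ∣ gN := by
    have h1 := hDg
    rw [hgcast] at h1
    exact_mod_cast h1
  have hfin : D = gN := Nat.dvd_antisymm hDgN hgD
  rw [hfin]
  exact hgcast.symm

-- ---- evaluating the two ports ----

theorem fold_keep_empty (l : List Int) : ∀ (it : PySem.Dict Int Int), it.items = [] →
    l.foldl (fun it a => it.items.foldl (stepA a) it) it = it := by
  induction l with
  | nil => intro it _; rfl
  | cons a t iht =>
    intro it h
    simp only [List.foldl_cons]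
    have h1 : it.items.foldl (stepA a) it = it := by
      rw [h]
      exact List.foldl_nil
    rw [h1]
    exact iht it h

theorem solve_eval_le_one {N K : Int} {As : List Int} {mx mn : Int}
    (hmax : PySem.List.max? As (fun y => y) = some mx) (hK : ¬ K > mx)
    (hmin : PySem.List.min? As (fun y => y) = some mn) (hmn : mn ≤ 1) :
    solve N K As = "POSSIBLE" := by
  unfold solve
  rw [hmax]
  simp only [if_neg hK]
  rw [hmin]
  simp only [factor_of_le_one hmn]
  have hitems : (PySem.Dict.counter ([] : List Int) : PySem.Dict Int Int).items = [] := rfl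
  rw [fold_keep_empty As _ hitems]
  have hvals : (PySem.Dict.counter ([] : List Int) : PySem.Dict Int Int).values = [] := rfl
  rw [hvals]
  simp

theorem solve_eval_ge_two {N K : Int} {As : List Int} {mx mn : Int}
    (hmax : PySem.List.max? As (fun y => y) = some mx) (hK : ¬ K > mx)
    (hmin : PySem.List.min? As (fun y => y) = some mn) (hmn : 2 ≤ mn) :
    solve N K As = if PySem.Int.mod K (gcdList As) = 0 then "POSSIBLE" else "IMPOSSIBLE" := by
  have hmem : mn ∈ As := PySem.List.min?_mem hmin
  have hall : ∀ a ∈ As, mn ≤ a := fun a ha => PySem.List.min?_isMin hmin a ha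
  have hA2 : ∀ a ∈ As, 2 ≤ a := fun a ha => le_trans hmn (hall a ha)
  unfold solve
  rw [hmax]
  simp only [if_neg hK]
  rw [hmin]
  simp only [factor_eq hmn]
  set m := mn.toNat with hm
  set L := PySem.Set.ofList m.primeFactorsList with hLdef
  set it0 := (PySem.Dict.counter (m.primeFactorsList.map (fun (p : Nat) => (p : Int))) :
    PySem.Dict Int Int) with hit0
  have hkeys0 : it0.keys = L.map (fun (p : Nat) => (p : Int)) := by
    rw [hit0, PySem.Dict.keys_counter, ofList_map_natCast]
  have hnd0 : it0.keys.Nodup := PySem.Dict.nodup_keys_counter _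
  have hLpr : ∀ p ∈ L, p.Prime := by
    intro p hp
    exact Nat.prime_of_mem_primeFactorsList ((PySem.Set.mem_ofList _ _).mp hp)
  have hget0 : ∀ p ∈ L, it0.getD (p : Int) 0 = ((eI p mn : Nat) : Int) := by
    intro p hp
    rw [hit0, PySem.Dict.getD_counter]
    have hcnt : List.count ((p : Nat) : Int) (m.primeFactorsList.map (fun (q : Nat) => (q : Int)))
        = List.count p m.primeFactorsList :=
      List.count_map_of_injective _ _ (fun x y h => by exact_mod_cast h) _
    rw [hcnt, Nat.primeFactorsList_count_eq]
    rfl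
  obtain ⟨hkeysF, hgetF⟩ := outer_fold As it0 hnd0
  set itF := As.foldl (fun it a => it.items.foldl (stepA a) it) it0 with hitF
  have hndF : itF.keys.Nodup := by rw [hkeysF]; exact hnd0
  have hgetFp : ∀ p ∈ L, itF.getD (p : Int) 0 = ((Vv mn As p : Nat) : Int) := by
    intro p hp
    have hpk : (p : Int) ∈ it0.keys := by rw [hkeys0]; exact List.mem_map_of_mem hp
    rw [hgetF _ hpk, hget0 p hp]
    exact foldl_newv_eq As p (hLpr p hp) (fun a ha => by have := hA2 a ha; omega) (eI p mn)
  have hvals : itF.values = L.map (fun (p : Nat) => ((Vv mn As p : Nat) : Int)) := by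
    rw [PySem.Dict.values_eq_map_keys itF hndF 0, hkeysF, hkeys0, List.map_map]
    exact List.map_congr_left (fun p hp => hgetFp p hp)
  have hitemsF : itF.items = L.map (fun (p : Nat) => ((p : Int), ((Vv mn As p : Nat) : Int))) := by
    rw [PySem.Dict.items_eq_map_keys itF hndF 0, hkeysF, hkeys0, List.map_map]
    refine List.map_congr_left (fun p hp => ?_)
    simp only [Function.comp_apply]
    rw [hgetFp p hp]
  by_cases hz : (itF.values.all (fun v => v == 0)) = true
  · rw [if_pos hz]
    have hVz : ∀ p ∈ L, Vv mn As p = 0 := by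
      rw [hvals] at hz
      intro p hp
      have hb := List.all_eq_true.mp hz _ (List.mem_map_of_mem hp)
      have : ((Vv mn As p : Nat) : Int) = 0 := beq_iff_eq.mp hb
      exact_mod_cast this
    have hD1 : ((L.map (fun p => p ^ Vv mn As p)).prod) = 1 := by
      apply List.prod_eq_one
      intro x hx
      obtain ⟨p, hp, rfl⟩ := List.mem_map.mp hx
      rw [hVz p hp, pow_zero]
    have hg1 : gcdList As = 1 := by
      rw [← core_eq As mn hmem hmn hall, hD1]
      rfl
    rw [hg1, if_pos ((PySem.Int.mod_eq_zero_iff_dvd K 1).mpr (one_dvd K))]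
  · rw [if_neg hz]
    have hd : itF.items.foldl (fun d kv => if kv.2 ≠ 0 then d * kv.1 ^ kv.2.toNat else d) 1
        = gcdList As := by
      rw [hitemsF]
      have hmm : L.map (fun (p : Nat) => ((p : Int), ((Vv mn As p : Nat) : Int)))
          = (L.map (fun p => (p, Vv mn As p))).map (fun pv => ((pv.1 : Int), (pv.2 : Int))) := by
        rw [List.map_map]
        rfl
      rw [hmm, foldl_prod_cast, one_mul, List.map_map]
      have hcomp : ((fun (pv : Nat × Nat) => (pv.1 : Int) ^ pv.2) ∘ (fun p => (p, Vv mn As p)))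
          = fun (p : Nat) => (p : Int) ^ Vv mn As p := rfl
      rw [hcomp, cast_prod_pow]
      exact core_eq As mn hmem hmn hall
    rw [hd]

theorem solve_alt_eval {N K : Int} {As : List Int} {mx : Int}
    (hmax : PySem.List.max? As (fun y => y) = some mx) (hK : ¬ K > mx) :
    solve_alt N K As = if gcdList As = 0 then "POSSIBLE"
      else if PySem.Int.mod K (gcdList As) = 0 then "POSSIBLE" else "IMPOSSIBLE" := by
  unfold solve_alt
  rw [hmax]
  simp only [if_neg hK]
  rw [foldl_euclid_eq_gcdList]

-- ===== VERDICT =====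
theorem solve_spec : Claim_unchanged_solve := by
  unfold Claim_unchanged_solve
  intro N K As _ hpre
  intro hD
  obtain ⟨mx, hmax⟩ : ∃ mx, PySem.List.max? As (fun y => y) = some mx := by
    cases h : PySem.List.max? As (fun y => y) with
    | none => exact absurd ((PySem.List.max?_eq_none_iff As _).mp h) hpre
    | some mx => exact ⟨mx, rfl⟩
  by_cases hK : K > mx
  · have hA : solve N K As = "IMPOSSIBLE" := by
      unfold solve; rw [hmax]; simp only [if_pos hK]
    have hB : solve_alt N K As = "IMPOSSIBLE" := by
      unfold solve_alt; rw [hmax]; simp only [if_pos hK]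
    rw [hA, hB]
  · obtain ⟨mn, hmin⟩ : ∃ mn, PySem.List.min? As (fun y => y) = some mn := by
      cases h : PySem.List.min? As (fun y => y) with
      | none => exact absurd ((PySem.List.min?_eq_none_iff As _).mp h) hpre
      | some mn => exact ⟨mn, rfl⟩
    rw [solve_alt_eval hmax hK]
    by_cases h2 : 2 ≤ mn
    · rw [solve_eval_ge_two hmax hK hmin h2]
      have hgnz : gcdList As ≠ 0 := by
        intro h0
        have hdd := gcdList_dvd_mem As (PySem.List.min?_mem hmin)
        rw [h0] at hdd
        have : mn = 0 := zero_dvd_iff.mp hdd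
        omega
      rw [if_neg hgnz]
    · push_neg at h2
      have hmn1 : mn ≤ 1 := by omega
      rw [solve_eval_le_one hmax hK hmin hmn1]
      by_cases hg : gcdList As = 0
      · rw [if_pos hg]
      · rw [if_neg hg]
        have hdvd : gcdList As ∣ K := by
          by_cases h1 : 1 ≤ mn
          · have hmn1' : mn = 1 := by omega
            have hd1 : gcdList As ∣ 1 := by
              have hdd := gcdList_dvd_mem As (PySem.List.min?_mem hmin)
              rwa [hmn1'] at hdd
            exact dvd_trans hd1 (one_dvd K)
          · push_neg at h1
            by_contra hndvd
            exact hD ⟨⟨mx, PySem.List.max?_mem hmax, by omega⟩,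
              ⟨mn, PySem.List.min?_mem hmin, by omega⟩,
              by rw [gcdInput_eq_gcdList]; exact hg,
              by rw [gcdInput_eq_gcdList]; exact hndvd⟩
        rw [if_pos ((PySem.Int.mod_eq_zero_iff_dvd K (gcdList As)).mpr hdvd)]

theorem solve_changed : Claim_changed_solve := by
  unfold Claim_changed_solve
  refine ⟨by decide, by decide, ?_, ?_, ?_, by decide⟩
  · show D_solve 2 (-5) [-4, -6]
    refine ⟨by decide, by decide, ?_, ?_⟩ <;> rw [gcdInput_eq_gcdList] <;> decide
  · show solve 2 (-5) [-4, -6] = "POSSIBLE"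
    exact solve_eval_le_one (mx := -4) (mn := -6) (by decide) (by decide) (by decide) (by decide)
  · show solve_alt 2 (-5) [-4, -6] = "IMPOSSIBLE"
    rw [solve_alt_eval (mx := -4) (by decide) (by decide)]
    decide

theorem solve_tight : Claim_exact_solve := by
  unfold Claim_exact_solve
  intro N K As _ _ hD
  obtain ⟨⟨a1, ha1, hKa⟩, ⟨a0, ha0, ha0le⟩, hg, hgk⟩ := hD
  rw [gcdInput_eq_gcdList] at hg hgk
  obtain ⟨mx, hmax⟩ : ∃ mx, PySem.List.max? As (fun y => y) = some mx := by
    cases h : PySem.List.max? As (fun y => y) with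
    | none =>
      rw [(PySem.List.max?_eq_none_iff As _).mp h] at ha1
      cases ha1
    | some mx => exact ⟨mx, rfl⟩
  have hK : ¬ K > mx := by
    have hle := PySem.List.max?_isMax hmax a1 ha1
    simp only [] at hle
    omega
  obtain ⟨mn, hmin⟩ : ∃ mn, PySem.List.min? As (fun y => y) = some mn := by
    cases h : PySem.List.min? As (fun y => y) with
    | none =>
      rw [(PySem.List.min?_eq_none_iff As _).mp h] at ha1
      cases ha1
    | some mn => exact ⟨mn, rfl⟩
  have hmn : mn ≤ 1 := by
    have hle := PySem.List.min?_isMin hmin a0 ha0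
    simp only [] at hle
    omega
  rw [solve_eval_le_one hmax hK hmin hmn]
  rw [solve_alt_eval hmax hK]
  rw [if_neg hg]
  rw [if_neg (fun hmod => hgk ((PySem.Int.mod_eq_zero_iff_dvd K (gcdList As)).mp hmod))]
  decide
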